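-- pv_equiv track=rewrite | github.com/newkimjiwon/CodingTest | BAEKJOON/G2/3109번_빵집.py | dfs
-- ===== SOURCE A (Python) =====
-- move = [(-1, 1), (0, 1), (1, 1)]
--
-- def dfs(y, x, pipe, r, c):
--     pipe[y][x] = 'x'  # 방문 표시
--
--     if x == c - 1:
--         return True  # 성공 도착
--
--     for dy, dx in move:
--         ny, nx = y + dy, x + dx
--         if 0 <= ny < r and 0 <= nx < c and pipe[ny][nx] == '.':
--             if dfs(ny, nx, pipe, r, c):
--                 return True  # 성공 경로는 계속 True 리턴
--
--     return False  # 도달 실패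
-- ===== SOURCE B (Python) =====
-- # Iterative DFS with an explicit stack (mark-on-pop with a '.-recheck'), replacing A's recursion.
-- # Like A, it mutates pipe in place (marks visited cells 'x'); the proved equivalence is about the return value.
-- move = [(-1, 1), (0, 1), (1, 1)]
--
-- def dfs(y, x, pipe, r, c):
--     pipe[y][x] = 'x'
--     if x == c - 1:
--         return True
--     stack = []
--     for dy, dx in reversed(move):
--         ny, nx = y + dy, x + dx
--         if 0 <= ny < r and 0 <= nx < c and pipe[ny][nx] == '.':
--             stack.append((ny, nx))
--     while stack:
--         cy, cx = stack.pop()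
--         if pipe[cy][cx] != '.':
--             continue
--         pipe[cy][cx] = 'x'
--         if cx == c - 1:
--             return True
--         for dy, dx in reversed(move):
--             ny, nx = cy + dy, cx + dx
--             if 0 <= ny < r and 0 <= nx < c and pipe[ny][nx] == '.':
--                 stack.append((ny, nx))
--     return False
-- ===== Notes on version B (the rewrite author's own statement) =====
-- stated objective: alternative
-- what changed: A's recursive DFS is replaced by an iterative DFS over an explicit stack of (y,x) cells: candidates are pushed in reverse move order and re-checked for '.' on pop, so marking happens on pop instead of on call entry.
-- outside the precondition, e.g. on dfs(0, 0, [['x', '.'], ['#']], 2, 2): A returns True, B raises IndexError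
import Mathlib
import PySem

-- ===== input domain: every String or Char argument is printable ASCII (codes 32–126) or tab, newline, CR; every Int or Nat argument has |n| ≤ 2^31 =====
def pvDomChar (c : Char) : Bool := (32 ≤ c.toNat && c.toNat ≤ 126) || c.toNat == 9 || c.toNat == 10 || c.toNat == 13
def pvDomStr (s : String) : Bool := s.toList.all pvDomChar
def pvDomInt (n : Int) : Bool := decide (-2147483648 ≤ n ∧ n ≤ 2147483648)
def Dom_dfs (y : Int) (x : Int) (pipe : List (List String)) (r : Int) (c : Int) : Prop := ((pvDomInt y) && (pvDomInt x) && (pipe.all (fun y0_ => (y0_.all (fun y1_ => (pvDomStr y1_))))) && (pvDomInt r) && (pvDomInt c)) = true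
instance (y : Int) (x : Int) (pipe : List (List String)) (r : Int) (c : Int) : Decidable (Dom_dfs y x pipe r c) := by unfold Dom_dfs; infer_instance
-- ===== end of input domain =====

-- B replaces A's recursive DFS by an iterative DFS over an explicit stack (mark-on-pop with a '.'-recheck);
-- both Pythons mutate `pipe` in place identically (marking visited cells 'x'): the equivalence proved here is
-- about the return value (the ports thread the grid as a value and return the Bool).

-- ===== PORT A =====
-- the module constant `move`
def movesA : List (Int × Int) := [(-1, 1), (0, 1), (1, 1)]

-- pipe[ny][nx] (Python indexing: negative from the end; none = IndexError, excluded by Pre_)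
def getCell (g : List (List String)) (y x : Int) : Option String :=
  (PySem.List.pyGet? g y).bind (fun row => PySem.List.pyGet? row x)

-- pipe[y][x] = 'x' (Python indexing; on an index Python would raise at, the port is a no-op — Pre_ excludes those)
def setCell (g : List (List String)) (y x : Int) : List (List String) :=
  (((PySem.List.pyGet? g y).bind (fun row => PySem.List.pySet? row x "x")).map
    (fun row' => PySem.List.pySetD g y row')).getD g

-- number of '.' cells; only used as recursion fuel for the port of A (a totality guard:
-- every recursive call of A marks a '.' cell, so this fuel is never exhausted)
def dotCount (g : List (List String)) : Nat := (g.map (fun row => row.count ".")).sum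

-- ---- helpers the ports' termination arguments cite by name ----
theorem pyIdx?_some_lt {n : Nat} {i : Int} {k : Nat} (h : PySem.List.pyIdx? n i = some k) : k < n := by
  unfold PySem.List.pyIdx? at h
  split at h <;> split at h <;> simp_all <;> omega

theorem count_set_x (row : List String) (j : Nat) (hj : j < row.length) :
    (row.set j "x").count "." + (if row[j] = "." then 1 else 0) = row.count "." := by
  induction row generalizing j with
  | nil => simp at hj
  | cons a t ih =>
    cases j with
    | zero => simp [List.count_cons]
    | succ j =>
      have hjt : j < t.length := by simpa using hj
      simp only [List.set_cons_succ, List.count_cons, List.getElem_cons_succ]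
      have h := ih j hjt
      by_cases htj : t[j] = "."
      · simp [htj] at h ⊢; omega
      · simp [htj] at h ⊢; omega

theorem dot_set (g : List (List String)) (i : Nat) (row' : List String) (hi : i < g.length) :
    dotCount (g.set i row') + (g[i].count ".") = dotCount g + row'.count "." := by
  induction g generalizing i with
  | nil => simp at hi
  | cons a t ih =>
    cases i with
    | zero => simp [dotCount]; omega
    | succ i =>
      simp only [List.set_cons_succ, dotCount, List.map_cons, List.sum_cons, List.getElem_cons_succ]
      have h := ih i (by simpa using hi)
      simp only [dotCount] at h
      omega

theorem getCell_some {g : List (List String)} {y x : Int} {v : String} (h : getCell g y x = some v) :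
    ∃ i row j, PySem.List.pyIdx? g.length y = some i ∧ g[i]? = some row ∧
      PySem.List.pyIdx? row.length x = some j ∧ row[j]? = some v := by
  unfold getCell PySem.List.pyGet? at h
  rcases hi : PySem.List.pyIdx? g.length y with _ | i
  · rw [hi] at h; simp at h
  · rw [hi, Option.bind_some] at h
    rcases hrow : g[i]? with _ | row
    · rw [hrow] at h; simp at h
    · rw [hrow, Option.bind_some] at h
      rcases hj : PySem.List.pyIdx? row.length x with _ | j
      · rw [hj] at h; simp at h
      · rw [hj, Option.bind_some] at h
        exact ⟨i, row, j, rfl, hrow, hj, h⟩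

theorem setCell_eq_of {g : List (List String)} {y x : Int} {i j : Nat} {row : List String}
    (hi : PySem.List.pyIdx? g.length y = some i) (hrow : g[i]? = some row)
    (hj : PySem.List.pyIdx? row.length x = some j) :
    setCell g y x = g.set i (row.set j "x") := by
  have hg : PySem.List.pyGet? g y = some row := by
    unfold PySem.List.pyGet?; rw [hi, Option.bind_some, hrow]
  have hs : PySem.List.pySet? row x "x" = some (row.set j "x") := by
    unfold PySem.List.pySet?; rw [hj]; rfl
  have hd : PySem.List.pySetD g y (row.set j "x") = g.set i (row.set j "x") := by
    unfold PySem.List.pySetD PySem.List.pySet?; rw [hi]; rfl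
  unfold setCell
  rw [hg, Option.bind_some, hs, Option.map_some, Option.getD_some, hd]

-- used by loopB's termination: marking a '.' cell lowers dotCount by one
theorem dot_setCell_eq (g : List (List String)) (y x : Int) (h : getCell g y x = some ".") :
    dotCount (setCell g y x) + 1 = dotCount g := by
  obtain ⟨i, row, j, hi, hrow, hj, hv⟩ := getCell_some h
  rw [setCell_eq_of hi hrow hj]
  have hilt := pyIdx?_some_lt hi
  have hjlt := pyIdx?_some_lt hj
  obtain ⟨_, hgi⟩ := List.getElem?_eq_some_iff.mp hrow
  obtain ⟨_, hrj⟩ := List.getElem?_eq_some_iff.mp hv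
  have h1 := dot_set g i (row.set j "x") hilt
  rw [hgi] at h1
  have h2 := count_set_x row j hjlt
  rw [hrj] at h2
  simp at h2
  omega

mutual
-- literal port of A's body: mark, target test, then the for-loop over `move` (dfsTryA)
def dfsGoA (fuel : Nat) (y x : Int) (g : List (List String)) (r c : Int) : Bool × List (List String) :=
  match fuel with
  | 0 => (false, g)   -- fuel guard, never reached (see dotCount)
  | fuel + 1 =>
    let g1 := setCell g y x
    if x = c - 1 then (true, g1)
    else dfsTryA fuel y x movesA g1 r c
termination_by (fuel, 0)

-- the for-loop: try the remaining moves in order, threading the mutated grid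
def dfsTryA (fuel : Nat) (y x : Int) (ms : List (Int × Int)) (g : List (List String)) (r c : Int) : Bool × List (List String) :=
  match ms with
  | [] => (false, g)
  | d :: ms =>
    if 0 ≤ y + d.1 ∧ y + d.1 < r ∧ 0 ≤ x + d.2 ∧ x + d.2 < c ∧ getCell g (y + d.1) (x + d.2) = some "." then
      match dfsGoA fuel (y + d.1) (x + d.2) g r c with
      | (true, g') => (true, g')
      | (false, g') => dfsTryA fuel y x ms g' r c
    else dfsTryA fuel y x ms g r c
termination_by (fuel, ms.length + 1)
end

def dfs (y : Int) (x : Int) (pipe : List (List String)) (r : Int) (c : Int) : Bool :=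
  (dfsGoA (dotCount pipe + 1) y x pipe r c).1

-- ===== PORT B =====
-- the in-bounds '.' neighbours of (y,x) among the moves ms, in move order.  Source B pushes them in
-- reversed(move) order onto an append-at-the-end stack (top = end); with a head-is-top list stack
-- that is exactly prepending this in-order list.
def kidsFrom (ms : List (Int × Int)) (y x : Int) (g : List (List String)) (r c : Int) : List (Int × Int) :=
  ms.filterMap (fun d =>
    if 0 ≤ y + d.1 ∧ y + d.1 < r ∧ 0 ≤ x + d.2 ∧ x + d.2 < c ∧ getCell g (y + d.1) (x + d.2) = some "." then
      some (y + d.1, x + d.2)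
    else none)

theorem length_kidsFrom_le (ms : List (Int × Int)) (y x : Int) (g : List (List String)) (r c : Int) :
    (kidsFrom ms y x g r c).length ≤ ms.length :=
  List.length_filterMap_le _ _

-- Source B's while-loop: pop, skip unless still '.', mark, target test, push children
def loopB (r c : Int) : List (Int × Int) → List (List String) → Bool × List (List String)
  | [], g => (false, g)
  | p :: st, g =>
    if hdot : getCell g p.1 p.2 = some "." then -- hdot is used by the termination proof
      let g1 := setCell g p.1 p.2
      if p.2 = c - 1 then (true, g1)
      else loopB r c (kidsFrom movesA p.1 p.2 g1 r c ++ st) g1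
    else loopB r c st g
termination_by st g => 4 * dotCount g + st.length
decreasing_by
  · have h1 := dot_setCell_eq g p.1 p.2 hdot
    have h2 := length_kidsFrom_le movesA p.1 p.2 (setCell g p.1 p.2) r c
    have h3 : movesA.length = 3 := rfl
    simp only [List.length_append, List.length_cons]
    omega
  · simp only [List.length_cons]
    omega

def dfs_alt (y : Int) (x : Int) (pipe : List (List String)) (r : Int) (c : Int) : Bool :=
  let g1 := setCell pipe y x
  if x = c - 1 then true
  else (loopB r c (kidsFrom movesA y x g1 r c) g1).1

-- ===== PRECONDITION & SPEC =====
-- Pre_ = the inputs on which the Python A surely returns: the root assignment pipe[y][x] = 'x' is in range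
-- (Python indexing, so a negative in-range y or x is admitted), and either no neighbour can ever be probed
-- (x ≥ c-1, c ≤ 0 or r ≤ 0: the bound checks kill every probe) or r ≤ len(pipe) and the first r rows are at
-- least c wide.  This is conservative: A can also return on ragged grids when the search happens never to
-- reach a short row — whether A raises there is reachability-dependent, not closed-form, and B (which probes
-- all three neighbours of a cell before descending) raises IndexError on some of those inputs, so they are excluded.
def Pre_dfs (y : Int) (x : Int) (pipe : List (List String)) (r : Int) (c : Int) : Prop :=
  ((PySem.List.pyGet? pipe y).any (fun row => decide (PySem.Raise.InRange row.length x)) = true)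
  ∧ (c - 1 ≤ x ∨ c ≤ 0 ∨ r ≤ 0 ∨
     (r ≤ (pipe.length : Int) ∧ ∀ row ∈ pipe.take r.toNat, c ≤ (row.length : Int)))

instance (y : Int) (x : Int) (pipe : List (List String)) (r : Int) (c : Int) : Decidable (Pre_dfs y x pipe r c) := by
  unfold Pre_dfs; infer_instance

def pvWitness_dfs : Int × Int × List (List String) × Int × Int := (0, 0, [[".", "."]], 1, 2)

def Spec_dfs (y : Int) (x : Int) (pipe : List (List String)) (r : Int) (c : Int) (out : Bool) : Prop := out = dfs_alt y x pipe r c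
instance (y : Int) (x : Int) (pipe : List (List String)) (r : Int) (c : Int) (out : Bool) : Decidable (Spec_dfs y x pipe r c out) := by unfold Spec_dfs; infer_instance

-- ===== CLAIM (what is proved, stated in full; the proofs are below) =====
def Claim_equal_dfs : Prop := ∀ (y : Int) (x : Int) (pipe : List (List String)) (r : Int) (c : Int), Dom_dfs y x pipe r c → Pre_dfs y x pipe r c → Spec_dfs y x pipe r c (dfs y x pipe r c)

-- ===== LEMMAS AND PROOFS =====

theorem setCell_cases (g : List (List String)) (y x : Int) :
    setCell g y x = g ∨ ∃ i row j, PySem.List.pyIdx? g.length y = some i ∧ g[i]? = some row ∧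
      PySem.List.pyIdx? row.length x = some j ∧ setCell g y x = g.set i (row.set j "x") := by
  rcases hi : PySem.List.pyIdx? g.length y with _ | i
  · left; unfold setCell PySem.List.pyGet?; rw [hi]; rfl
  · have hilt := pyIdx?_some_lt hi
    have hrow : g[i]? = some g[i] := List.getElem?_eq_getElem hilt
    rcases hj : PySem.List.pyIdx? (g[i]).length x with _ | j
    · left
      unfold setCell PySem.List.pyGet? PySem.List.pySet?
      rw [hi, Option.bind_some, hrow, Option.bind_some, hj]; rfl
    · right
      exact ⟨i, g[i], j, rfl, hrow, hj, setCell_eq_of hi hrow hj⟩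

theorem getCell_setCell_or (g : List (List String)) (y x y' x' : Int) :
    getCell (setCell g y x) y' x' = getCell g y' x' ∨ getCell (setCell g y x) y' x' = some "x" := by
  rcases setCell_cases g y x with h | ⟨i, row, j, hi, hrow, hj, h⟩
  · rw [h]; left; rfl
  · rw [h]
    have hilt := pyIdx?_some_lt hi
    have hjlt := pyIdx?_some_lt hj
    unfold getCell PySem.List.pyGet?
    rw [List.length_set]
    rcases hk : PySem.List.pyIdx? g.length y' with _ | k
    · left; rfl
    · rw [Option.bind_some, Option.bind_some]
      by_cases hki : k = i
      · subst hki
        rw [List.getElem?_set_self (by omega), hrow, Option.bind_some, Option.bind_some,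
            List.length_set]
        rcases hk2 : PySem.List.pyIdx? row.length x' with _ | k2
        · left; rfl
        · rw [Option.bind_some, Option.bind_some]
          by_cases hk2j : k2 = j
          · subst hk2j
            right
            rw [List.getElem?_set_self (by omega)]
          · left
            rw [List.getElem?_set_ne (Ne.symm hk2j)]
      · left
        rw [List.getElem?_set_ne (Ne.symm hki)]

theorem count_set_x_le (row : List String) (j : Nat) :
    (row.set j "x").count "." ≤ row.count "." := by
  by_cases hj : j < row.length
  · have := count_set_x row j hj; omega
  · rw [List.set_eq_of_length_le (by omega)]

theorem dot_setCell_le (g : List (List String)) (y x : Int) :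
    dotCount (setCell g y x) ≤ dotCount g := by
  rcases setCell_cases g y x with h | ⟨i, row, j, hi, hrow, hj, h⟩
  · rw [h]
  · rw [h]
    have hilt := pyIdx?_some_lt hi
    obtain ⟨_, hgi⟩ := List.getElem?_eq_some_iff.mp hrow
    have h1 := dot_set g i (row.set j "x") hilt
    rw [hgi] at h1
    have h2 := count_set_x_le row j
    omega

-- the reachable grid states: cells are only ever overwritten with 'x'
def GEvolve (g g' : List (List String)) : Prop :=
  Relation.ReflTransGen (fun a b => ∃ y x, b = setCell a y x) g g'

theorem evolve_setCell (g : List (List String)) (y x : Int) : GEvolve g (setCell g y x) :=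
  Relation.ReflTransGen.single ⟨y, x, rfl⟩

theorem evolve_trans {a b c : List (List String)} (h1 : GEvolve a b) (h2 : GEvolve b c) : GEvolve a c :=
  Relation.ReflTransGen.trans h1 h2

theorem evolve_cell {g g' : List (List String)} (h : GEvolve g g') (y x : Int) :
    getCell g' y x = getCell g y x ∨ getCell g' y x = some "x" := by
  induction h with
  | refl => left; rfl
  | tail _ hstep ih =>
    obtain ⟨y0, x0, rfl⟩ := hstep
    rcases getCell_setCell_or _ y0 x0 y x with h1 | h1
    · rw [h1]; exact ih
    · right; exact h1

theorem evolve_dot {g g' : List (List String)} (h : GEvolve g g') : dotCount g' ≤ dotCount g := by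
  induction h with
  | refl => exact le_refl _
  | tail _ hstep ih =>
    obtain ⟨y0, x0, rfl⟩ := hstep
    exact le_trans (dot_setCell_le _ y0 x0) ih

theorem evolve_dot_cell {g g' : List (List String)} (h : GEvolve g g') {y x : Int}
    (hc : getCell g' y x = some ".") : getCell g y x = some "." := by
  rcases evolve_cell h y x with h1 | h1
  · rw [h1] at hc; exact hc
  · rw [hc] at h1; simp at h1

-- the grids produced by A's recursion evolve from the input grid
theorem evolveA (fuel : Nat) :
    (∀ (y x : Int) (g : List (List String)) (r c : Int), GEvolve g (dfsGoA fuel y x g r c).2) ∧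
    (∀ (y x r c : Int) (ms : List (Int × Int)), ∀ g : List (List String), GEvolve g (dfsTryA fuel y x ms g r c).2) := by
  induction fuel with
  | zero =>
    constructor
    · intro y x g r c; simp only [dfsGoA]; exact Relation.ReflTransGen.refl
    · intro y x r c ms
      induction ms with
      | nil => intro g; simp only [dfsTryA]; exact Relation.ReflTransGen.refl
      | cons d t ih =>
        intro g
        simp only [dfsTryA]
        split
        · have hz : dfsGoA 0 (y + d.1) (x + d.2) g r c = (false, g) := by simp [dfsGoA]
          rw [hz]
          exact ih g
        · exact ih g
  | succ f ihf =>
    have hGo : ∀ (y x : Int) (g : List (List String)) (r c : Int), GEvolve g (dfsGoA (f + 1) y x g r c).2 := by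
      intro y x g r c
      simp only [dfsGoA]
      split
      · exact evolve_setCell g y x
      · exact evolve_trans (evolve_setCell g y x) (ihf.2 y x r c movesA (setCell g y x))
    refine ⟨hGo, ?_⟩
    intro y x r c ms
    induction ms with
    | nil => intro g; simp only [dfsTryA]; exact Relation.ReflTransGen.refl
    | cons d t ih =>
      intro g
      simp only [dfsTryA]
      split
      · rcases hgo : dfsGoA (f + 1) (y + d.1) (x + d.2) g r c with ⟨b, g'⟩
        have hg' : GEvolve g g' := by
          have h := hGo (y + d.1) (x + d.2) g r c
          rw [hgo] at h
          exact h
        cases b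
        · exact evolve_trans hg' (ih g')
        · exact hg'
      · exact ih g

-- l₂ is l₁ with some cells that are not '.' in the reference grid deleted
inductive DelL (gref : List (List String)) : List (Int × Int) → List (Int × Int) → Prop
  | nil : DelL gref [] []
  | keep (p : Int × Int) (t t' : List (Int × Int)) : DelL gref t t' → DelL gref (p :: t) (p :: t')
  | drop (p : Int × Int) (t t' : List (Int × Int)) :
      ¬ getCell gref p.1 p.2 = some "." → DelL gref t t' → DelL gref (p :: t) t'

theorem DelL_append_left {gref : List (List String)} {t t' : List (Int × Int)}
    (h : DelL gref t t') (l : List (Int × Int)) : DelL gref (l ++ t) (l ++ t') := by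
  induction l with
  | nil => exact h
  | cons p l ih => exact DelL.keep p _ _ ih

theorem DelL_refl {gref : List (List String)} (l : List (Int × Int)) : DelL gref l l := by
  induction l with
  | nil => exact DelL.nil
  | cons p l ih => exact DelL.keep p _ _ ih

theorem DelL_append_right {gref : List (List String)} {t t' : List (Int × Int)}
    (h : DelL gref t t') (l : List (Int × Int)) : DelL gref (t ++ l) (t' ++ l) := by
  induction h with
  | nil => exact DelL_refl l
  | keep p t t' _ ih => exact DelL.keep p _ _ ih
  | drop p t t' hst _ ih => exact DelL.drop p _ _ hst ih

-- pushing from an earlier grid only adds cells that the later grid has already marked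
theorem kids_del {g g' : List (List String)} (hev : GEvolve g g') (ms : List (Int × Int))
    (y x : Int) (r c : Int) : DelL g' (kidsFrom ms y x g r c) (kidsFrom ms y x g' r c) := by
  induction ms with
  | nil => exact DelL.nil
  | cons d t ih =>
    by_cases h1 : (0 ≤ y + d.1 ∧ y + d.1 < r ∧ 0 ≤ x + d.2 ∧ x + d.2 < c ∧ getCell g (y + d.1) (x + d.2) = some ".")
    · by_cases h2 : getCell g' (y + d.1) (x + d.2) = some "."
      · have h2' : (0 ≤ y + d.1 ∧ y + d.1 < r ∧ 0 ≤ x + d.2 ∧ x + d.2 < c ∧ getCell g' (y + d.1) (x + d.2) = some ".") :=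
          ⟨h1.1, h1.2.1, h1.2.2.1, h1.2.2.2.1, h2⟩
        simp only [kidsFrom, List.filterMap_cons, if_pos h1, if_pos h2']
        exact DelL.keep _ _ _ ih
      · have h2' : ¬ (0 ≤ y + d.1 ∧ y + d.1 < r ∧ 0 ≤ x + d.2 ∧ x + d.2 < c ∧ getCell g' (y + d.1) (x + d.2) = some ".") := by
          intro hcon; exact h2 hcon.2.2.2.2
        simp only [kidsFrom, List.filterMap_cons, if_pos h1, if_neg h2']
        exact DelL.drop _ _ _ h2 ih
    · have h2' : ¬ (0 ≤ y + d.1 ∧ y + d.1 < r ∧ 0 ≤ x + d.2 ∧ x + d.2 < c ∧ getCell g' (y + d.1) (x + d.2) = some ".") := by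
        intro hcon
        exact h1 ⟨hcon.1, hcon.2.1, hcon.2.2.1, hcon.2.2.2.1, evolve_dot_cell hev hcon.2.2.2.2⟩
      simp only [kidsFrom, List.filterMap_cons, if_neg h1, if_neg h2']
      exact ih

-- cells that were already marked when pushed may be deleted from the stack: the loop skips them anyway
theorem loopB_del (r c : Int) : ∀ (n : Nat) (gref l₁ l₂ : _) (g : List (List String)),
    4 * dotCount g + l₁.length ≤ n → DelL gref l₁ l₂ → GEvolve gref g →
    loopB r c l₁ g = loopB r c l₂ g := by
  intro n
  induction n with
  | zero =>
    intro gref l₁ l₂ g hn hdel hev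
    cases hdel with
    | nil => rfl
    | keep p t t' hd => simp [List.length_cons] at hn
    | drop p t t' hst hd => simp [List.length_cons] at hn
  | succ n ih =>
    intro gref l₁ l₂ g hn hdel hev
    cases hdel with
    | nil => rfl
    | keep p t t' hd =>
      by_cases hc : getCell g p.1 p.2 = some "."
      · simp only [loopB, dif_pos hc]
        by_cases hpc : p.2 = c - 1
        · rw [if_pos hpc, if_pos hpc]
        · rw [if_neg hpc, if_neg hpc]
          have h1 := dot_setCell_eq g p.1 p.2 hc
          have h2 := length_kidsFrom_le movesA p.1 p.2 (setCell g p.1 p.2) r c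
          have h3 : movesA.length = 3 := rfl
          refine ih gref _ _ _ ?_ (DelL_append_left hd _) (evolve_trans hev (evolve_setCell g p.1 p.2))
          simp only [List.length_append, List.length_cons] at hn ⊢
          omega
      · simp only [loopB, dif_neg hc]
        refine ih gref _ _ _ ?_ hd hev
        simp only [List.length_cons] at hn
        omega
    | drop p t t' hst hd =>
      have hc : ¬ getCell g p.1 p.2 = some "." := by
        rcases evolve_cell hev p.1 p.2 with h1 | h1
        · rw [h1]; exact hst
        · rw [h1]; simp
      simp only [loopB, dif_neg hc]
      refine ih gref _ _ _ ?_ hd hev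
      simp only [List.length_cons] at hn
      omega

-- the simulation: running B's loop on the pushed children of the pending moves ms equals
-- running A's for-loop on ms and continuing with the rest of the stack
theorem simA (r c : Int) : ∀ (fuel : Nat) (y x : Int) (ms : List (Int × Int))
    (g : List (List String)) (st : List (Int × Int)), dotCount g ≤ fuel →
    loopB r c (kidsFrom ms y x g r c ++ st) g =
      (if (dfsTryA fuel y x ms g r c).1 then dfsTryA fuel y x ms g r c
       else loopB r c st (dfsTryA fuel y x ms g r c).2) := by
  intro fuel
  induction fuel with
  | zero =>
    intro y x ms
    induction ms with
    | nil =>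
      intro g st h
      simp [kidsFrom, dfsTryA]
    | cons d t ih =>
      intro g st h
      by_cases hcond : (0 ≤ y + d.1 ∧ y + d.1 < r ∧ 0 ≤ x + d.2 ∧ x + d.2 < c ∧ getCell g (y + d.1) (x + d.2) = some ".")
      · exfalso
        have := dot_setCell_eq g (y + d.1) (x + d.2) hcond.2.2.2.2
        omega
      · have hkids : kidsFrom (d :: t) y x g r c = kidsFrom t y x g r c := by
          simp only [kidsFrom, List.filterMap_cons, if_neg hcond]
        have htry : dfsTryA 0 y x (d :: t) g r c = dfsTryA 0 y x t g r c := by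
          simp only [dfsTryA, if_neg hcond]
        rw [hkids, htry]
        exact ih g st h
  | succ f ihf =>
    intro y x ms
    induction ms with
    | nil =>
      intro g st h
      simp [kidsFrom, dfsTryA]
    | cons d t ih =>
      intro g st h
      by_cases hcond : (0 ≤ y + d.1 ∧ y + d.1 < r ∧ 0 ≤ x + d.2 ∧ x + d.2 < c ∧ getCell g (y + d.1) (x + d.2) = some ".")
      · have hcell : getCell g (y + d.1) (x + d.2) = some "." := hcond.2.2.2.2
        have hdot1 := dot_setCell_eq g (y + d.1) (x + d.2) hcell
        have hkids : kidsFrom (d :: t) y x g r c = (y + d.1, x + d.2) :: kidsFrom t y x g r c := by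
          simp only [kidsFrom, List.filterMap_cons, if_pos hcond]
        have htry : dfsTryA (f + 1) y x (d :: t) g r c =
            (match dfsGoA (f + 1) (y + d.1) (x + d.2) g r c with
             | (true, g') => (true, g')
             | (false, g') => dfsTryA (f + 1) y x t g' r c) := by
          simp only [dfsTryA, if_pos hcond]
        have hgo : dfsGoA (f + 1) (y + d.1) (x + d.2) g r c =
            (if x + d.2 = c - 1 then (true, setCell g (y + d.1) (x + d.2))
             else dfsTryA f (y + d.1) (x + d.2) movesA (setCell g (y + d.1) (x + d.2)) r c) := by
          simp only [dfsGoA]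
        rw [hkids]
        have hloop : loopB r c ((y + d.1, x + d.2) :: (kidsFrom t y x g r c ++ st)) g =
            (if x + d.2 = c - 1 then (true, setCell g (y + d.1) (x + d.2))
             else loopB r c (kidsFrom movesA (y + d.1) (x + d.2) (setCell g (y + d.1) (x + d.2)) r c ++ (kidsFrom t y x g r c ++ st)) (setCell g (y + d.1) (x + d.2))) := by
          simp only [loopB, dif_pos hcell]
        rw [List.cons_append, hloop]
        by_cases hxc : x + d.2 = c - 1
        · rw [if_pos hxc] at hgo ⊢
          rw [htry, hgo]
          simp
        · rw [if_neg hxc] at hgo ⊢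
          rw [htry, hgo]
          set g1 := setCell g (y + d.1) (x + d.2) with hg1
          have hev1 : GEvolve g g1 := evolve_setCell g (y + d.1) (x + d.2)
          have h1 : dotCount g1 ≤ f := by omega
          rw [ihf (y + d.1) (x + d.2) movesA g1 (kidsFrom t y x g r c ++ st) h1]
          rcases hres : dfsTryA f (y + d.1) (x + d.2) movesA g1 r c with ⟨b, g2⟩
          have hev2 : GEvolve g g2 := by
            have h := (evolveA f).2 (y + d.1) (x + d.2) r c movesA g1
            rw [hres] at h
            exact evolve_trans hev1 h
          cases b
          · have hdel : DelL g2 (kidsFrom t y x g r c) (kidsFrom t y x g2 r c) :=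
              kids_del hev2 t y x r c
            have hdd : loopB r c (kidsFrom t y x g r c ++ st) g2 =
                loopB r c (kidsFrom t y x g2 r c ++ st) g2 :=
              loopB_del r c (4 * dotCount g2 + (kidsFrom t y x g r c ++ st).length) g2 _ _ g2
                (le_refl _) (DelL_append_right hdel st) Relation.ReflTransGen.refl
            have h2 : dotCount g2 ≤ f + 1 := by
              have := evolve_dot hev2
              omega
            have hih := ih g2 st h2
            rw [← hdd] at hih
            simpa using hih
          · simp
      · have hkids : kidsFrom (d :: t) y x g r c = kidsFrom t y x g r c := by
          simp only [kidsFrom, List.filterMap_cons, if_neg hcond]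
        have htry : dfsTryA (f + 1) y x (d :: t) g r c = dfsTryA (f + 1) y x t g r c := by
          simp only [dfsTryA, if_neg hcond]
        rw [hkids, htry]
        exact ih g st h

theorem dfs_eq_alt (y : Int) (x : Int) (pipe : List (List String)) (r : Int) (c : Int) :
    dfs y x pipe r c = dfs_alt y x pipe r c := by
  unfold dfs dfs_alt
  have hgo : dfsGoA (dotCount pipe + 1) y x pipe r c =
      (if x = c - 1 then (true, setCell pipe y x)
       else dfsTryA (dotCount pipe) y x movesA (setCell pipe y x) r c) := by
    simp only [dfsGoA]
  rw [hgo]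
  by_cases hxc : x = c - 1
  · rw [if_pos hxc, if_pos hxc]
  · rw [if_neg hxc, if_neg hxc]
    have h := simA r c (dotCount pipe) y x movesA (setCell pipe y x) []
      (dot_setCell_le pipe y x)
    rw [List.append_nil] at h
    rw [h]
    rcases hres : dfsTryA (dotCount pipe) y x movesA (setCell pipe y x) r c with ⟨b, g2⟩
    cases b
    · simp [loopB]
    · simp

-- ===== VERDICT (by name: the statement is the Claim_ definition above) =====
theorem dfs_spec : Claim_equal_dfs := by
  intro y x pipe r c _ _
  unfold Spec_dfs
  exact dfs_eq_alt y x pipe r c
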